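-- pv_equiv track=rewrite | github.com/ChiniBau/TOC | 2.py | dfa_starts_with_01
-- ===== SOURCE A (Python) =====
-- def dfa_starts_with_01(string):
--     state = 'q0'
--
--     for char in string:
--         if state == 'q0':
--             if char == '0':
--                 state = 'q1'
--             else:
--                 return False
--         elif state == 'q1':
--             if char == '1':
--                 state = 'q2'
--             else:
--                 return False
--         elif state == 'q2':
--             if char in ('0', '1'):
--                 state = 'q2'
--             else:
--                 return False
--     return state == 'q2'
-- ===== SOURCE B (Python) =====
-- def dfa_starts_with_01(string):
--     seq = list(string)
--     return seq[:2] == ['0', '1'] and all(c in ('0', '1') for c in seq[2:])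
-- ===== Notes on version B (the rewrite author's own statement) =====
-- stated objective: simpler
-- what changed: Replaces the streaming state-machine loop with a stateless predicate: a prefix comparison seq[:2] == ['0','1'] plus an alphabet check over the rest.
import Mathlib
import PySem

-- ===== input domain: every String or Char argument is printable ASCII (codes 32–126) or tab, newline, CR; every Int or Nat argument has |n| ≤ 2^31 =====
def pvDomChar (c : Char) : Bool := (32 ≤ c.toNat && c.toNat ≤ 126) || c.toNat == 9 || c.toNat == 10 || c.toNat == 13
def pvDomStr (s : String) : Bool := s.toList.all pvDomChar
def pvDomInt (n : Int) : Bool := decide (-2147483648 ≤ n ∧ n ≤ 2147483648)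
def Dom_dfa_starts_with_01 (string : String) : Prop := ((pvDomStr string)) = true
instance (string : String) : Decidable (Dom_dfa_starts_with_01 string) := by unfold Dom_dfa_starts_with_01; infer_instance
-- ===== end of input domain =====

-- B replaces the streaming DFA state loop with a stateless predicate: prefix check + alphabet check (simpler).


-- ===== PORT A =====
-- literal transliteration of A's for-loop: state threaded through recursion, early 'return False' = false
def dfaLoopA : String → List Char → Bool
  | state, [] => state == "q2"
  | state, c :: rest =>
    if state == "q0" then
      (if c == '0' then dfaLoopA "q1" rest else false)
    else if state == "q1" then
      (if c == '1' then dfaLoopA "q2" rest else false)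
    else if state == "q2" then
      (if c == '0' || c == '1' then dfaLoopA "q2" rest else false)
    else dfaLoopA state rest

def dfa_starts_with_01 (string : String) : Bool := dfaLoopA "q0" string.toList

-- ===== PORT B =====
def dfa_starts_with_01_alt (string : String) : Bool :=
  let seq := string.toList
  (seq.take 2 == ['0', '1']) && (seq.drop 2).all (fun c => c == '0' || c == '1')

-- ===== PRECONDITION & SPEC =====
def Spec_dfa_starts_with_01 (string : String) (out : Bool) : Prop := out = dfa_starts_with_01_alt string
instance (string : String) (out : Bool) : Decidable (Spec_dfa_starts_with_01 string out) := by unfold Spec_dfa_starts_with_01; infer_instance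

-- ===== CLAIM (what is proved, stated in full; the proofs are below) =====
def Claim_equal_dfa_starts_with_01 : Prop := ∀ (string : String), Dom_dfa_starts_with_01 string → Spec_dfa_starts_with_01 string (dfa_starts_with_01 string)

-- ===== LEMMAS AND PROOFS =====
theorem dfaLoopA_q2 (l : List Char) :
    dfaLoopA "q2" l = l.all (fun c => c == '0' || c == '1') := by
  induction l with
  | nil => rfl
  | cons c rest ih =>
    simp only [dfaLoopA, List.all_cons]
    by_cases h0 : c = '0' <;> by_cases h1 : c = '1' <;> simp [h0, h1, ih]

-- ===== VERDICT (by name: the statement is the Claim_ definition above) =====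
theorem dfa_starts_with_01_spec : Claim_equal_dfa_starts_with_01 := by
  intro s _
  unfold Spec_dfa_starts_with_01 dfa_starts_with_01 dfa_starts_with_01_alt
  match h : s.toList with
  | [] => rfl
  | [c] =>
    by_cases h0 : c = '0' <;> simp [dfaLoopA, h0]
  | c :: d :: rest =>
    by_cases h0 : c = '0' <;> by_cases h1 : d = '1' <;>
      simp [dfaLoopA, h0, h1, dfaLoopA_q2]
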